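-- pv_equiv track=rewrite | github.com/tsailunli/python_projects | python_projects/boggle_game/boggle.py | check
-- ===== SOURCE A (Python) =====
-- def check(string):
-- 	"""
-- 	:param string: user's input
-- 	:return: whether the input is in legal format or not
-- 	"""
-- 	if len(string) != 7:
-- 		return False
-- 	else:
-- 		for i in range(len(string)):
-- 			if i % 2 == 0:
-- 				if not string[i].isalpha():
-- 					return False
-- 			else:
-- 				if string[i] is not ' ':
-- 					return False
-- 		return True
-- ===== SOURCE B (Python) =====
-- def check(string):
--     if len(string) != 7:
--         return False
--     return string[0::2].isalpha() and string[1::2] == '   '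
-- ===== Notes on version B (the rewrite author's own statement) =====
-- stated objective: simpler
-- what changed: Replaces the indexed loop with a parity branch by two strided-slice checks: the even-index subsequence must be alphabetic and the odd-index subsequence must equal three spaces.
import Mathlib
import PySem

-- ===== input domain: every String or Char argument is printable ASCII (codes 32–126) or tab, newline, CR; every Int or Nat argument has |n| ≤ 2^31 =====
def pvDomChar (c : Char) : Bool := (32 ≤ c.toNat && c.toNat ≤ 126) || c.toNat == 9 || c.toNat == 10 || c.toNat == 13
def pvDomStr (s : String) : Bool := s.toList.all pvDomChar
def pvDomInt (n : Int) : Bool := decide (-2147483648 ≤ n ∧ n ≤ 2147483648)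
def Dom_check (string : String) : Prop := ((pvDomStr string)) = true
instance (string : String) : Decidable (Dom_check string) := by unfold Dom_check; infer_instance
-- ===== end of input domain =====

-- B replaces A's indexed parity loop by two strided-slice checks (even chars alphabetic, odd chars = "   "): simpler.

-- ===== PORT A =====
-- the 'for i in range(len(string))' loop with early returns, over the remaining indices
def checkLoop (s : List Char) : List Int → Bool
  | [] => true
  | i :: rest =>
    if i % 2 == 0 then
      match PySem.List.pyGet? s i with
      | some c => if !(PySem.Str.isalpha c) then false else checkLoop s rest
      | none => false        -- unreachable: i ranges over the indices of s
    else
      match PySem.List.pyGet? s i with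
      | some c => if c ≠ ' ' then false else checkLoop s rest   -- 'string[i] is not ' '': identity = equality for interned 1-char strings
      | none => false

def check (string : String) : Bool :=
  if PySem.Str.len string ≠ 7 then false
  else checkLoop string.toList (PySem.List.pyRange 0 (PySem.Str.len string) 1)

-- ===== PORT B =====
def check_alt (string : String) : Bool :=
  if PySem.Str.len string ≠ 7 then false
  else
    match PySem.Str.slice? string (some 0) none 2, PySem.Str.slice? string (some 1) none 2 with
    | some ev, some od => PySem.Str.strIsalpha ev && od == "   "
    | _, _ => false

-- ===== PRECONDITION & SPEC =====
def Spec_check (string : String) (out : Bool) : Prop := out = check_alt string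
instance (string : String) (out : Bool) : Decidable (Spec_check string out) := by unfold Spec_check; infer_instance

-- ===== CLAIM (what is proved, stated in full; the proofs are below) =====
def Claim_equal_check : Prop := ∀ (string : String), Dom_check string → Spec_check string (check string)

-- ===== LEMMAS AND PROOFS =====

-- the even-index slice of a 7-character string, [0::2]
theorem slice02 (a b c d e f g : Char) :
    PySem.List.slice? [a,b,c,d,e,f,g] (some 0) none 2 = some [a,c,e,g] := by
  have h0 : PySem.List.sliceIndices 7 (some 0) none 2 = (0, 7, 2) := by decide
  simp [PySem.List.slice?, h0, List.range_succ]

-- the odd-index slice of a 7-character string, [1::2]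
theorem slice12 (a b c d e f g : Char) :
    PySem.List.slice? [a,b,c,d,e,f,g] (some 1) none 2 = some [b,d,f] := by
  have h0 : PySem.List.sliceIndices 7 (some 1) none 2 = (1, 7, 2) := by decide
  simp [PySem.List.slice?, h0, List.range_succ]

-- A's unrolled loop equals B's two slice tests, on seven abstract characters
theorem loop_eq_slices (a b c d e f g : Char) :
    checkLoop [a,b,c,d,e,f,g] [0,1,2,3,4,5,6] =
      (PySem.Str.strIsalpha (String.ofList [a,c,e,g]) && (String.ofList [b,d,f] == "   ")) := by
  have h2 : (String.ofList [b, d, f] == "   ")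
      = (decide (b = ' ') && decide (d = ' ') && decide (f = ' ')) := by
    by_cases hb : b = ' ' <;> by_cases hd : d = ' ' <;> by_cases hf : f = ' ' <;>
      simp [hb, hd, hf, String.ext_iff]
  simp only [checkLoop, PySem.List.pyGet?, PySem.List.pyIdx?, PySem.Str.strIsalpha,
    PySem.Chars.strIsalpha]
  simp [h2, PySem.Str.isalpha]
  ac_rfl

-- ===== VERDICT (by name: the statement is the Claim_ definition above) =====
theorem check_spec : Claim_equal_check := by
  intro s _
  unfold Spec_check check check_alt
  by_cases h : PySem.Str.len s = 7
  · have h7 : s.toList.length = 7 := by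
      have := h; simp [PySem.Str.len] at this; exact_mod_cast this
    obtain ⟨a, b, c, d, e, f, g, hs⟩ :
        ∃ a b c d e f g, s.toList = [a, b, c, d, e, f, g] := by
      match hl : s.toList, h7 with
      | [a, b, c, d, e, f, g], _ => exact ⟨a, b, c, d, e, f, g, rfl⟩
    have hr : PySem.List.pyRange 0 7 1 = [0,1,2,3,4,5,6] := by decide
    simp only [h, hr, ne_eq, not_true_eq_false, if_false]
    simp only [PySem.Str.slice?, PySem.Chars.slice?_eq_listSlice?, hs, slice02, slice12]
    simpa using loop_eq_slices a b c d e f g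
  · have h' : ¬((s.length : Int) = 7) := by simpa [PySem.Str.len] using h
    simp [h']
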